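-- pv_equiv track=rewrite | github.com/ashish91/dynamic-programming-patterns | longest-common-subsequence/insert-delete-on-two-strings.py | insert_delete_lcs
-- ===== SOURCE A (Python) =====
-- def insert_delete_lcs(x, y):
--   M = len(x)
--   N = len(y)
--
--   dp = [[0 for c in range(N+1)] for r in range(M+1)]
--
--   for r in range(M+1):
--     for c in range(N+1):
--       if r == 0 or c == 0:
--         dp[r][c] = max(r, c)
--       elif x[r-1] == y[c-1]:
--         dp[r][c] = dp[r-1][c-1]
--       else:
--         dp[r][c] = min(dp[r-1][c], dp[r][c-1]) + 1
--
--   return dp[M][N]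
-- ===== SOURCE B (Python) =====
-- def insert_delete_lcs(x, y):
--   # LCS length by folding a scan over zip(y, prev, prev[1:]), then M + N - 2*LCS.
--   ys = list(y)
--   prev = [0] * (len(ys) + 1)
--   for xc in x:
--     row = [0]
--     for yc, d, u in zip(ys, prev, prev[1:]):
--       row.append(d + 1 if xc == yc else max(u, row[-1]))
--     prev = row
--   return len(x) + len(ys) - 2 * prev[-1]
-- ===== Notes on version B (the rewrite author's own statement) =====
-- stated objective: alternative
-- what changed: B computes the longest-common-subsequence length (a different quantity, with the match: diag+1 / else max(up,left) recurrence) by folding a zip-scan over y into a single rolling row and returns M+N-2*LCS, instead of A's index-addressed full 2-D edit-cost table with base max(r,c) and min(up,left)+1; the rolling row avoids allocating and indexing the M*N table.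
import Mathlib
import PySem

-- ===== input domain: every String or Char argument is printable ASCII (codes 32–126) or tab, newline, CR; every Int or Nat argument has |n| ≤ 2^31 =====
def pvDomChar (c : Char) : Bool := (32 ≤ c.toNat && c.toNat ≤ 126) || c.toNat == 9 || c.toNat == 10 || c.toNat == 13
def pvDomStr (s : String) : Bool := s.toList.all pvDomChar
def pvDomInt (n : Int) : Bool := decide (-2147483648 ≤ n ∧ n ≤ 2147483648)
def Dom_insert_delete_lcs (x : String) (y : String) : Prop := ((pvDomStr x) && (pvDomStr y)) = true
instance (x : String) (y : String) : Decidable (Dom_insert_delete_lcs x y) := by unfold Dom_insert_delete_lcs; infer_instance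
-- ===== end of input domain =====

-- B maintains a different quantity (LCS length, not edit cost) with a different recurrence,
-- built by folding a zip-scan over y into one rolling row, and derives the answer as
-- M + N - 2*LCS instead of A's index-addressed 2-D edit-cost table (objective: alternative).

-- ===== PORT A =====
-- the inner loop of A for a row r ≥ 1, c = 1..N, left to right:
-- d = dp[r-1][c-1], u = dp[r-1][c], left = dp[r][c-1]
def pvStepA (xc : Char) : List Char → List Int → Int → List Int
  | yc :: ys', d :: u :: rest, left =>
      let v := if xc = yc then d else min u left + 1
      v :: pvStepA xc ys' (u :: rest) v
  | _, _, _ => []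

-- the outer loop of A, row after row; r is the index of the next row to fill
def pvRowsA (ys : List Char) : List Char → List Int → Int → List Int
  | [], prev, _ => prev
  | xc :: xs', prev, r => pvRowsA ys xs' (r :: pvStepA xc ys prev r) (r + 1)

def insert_delete_lcs (x : String) (y : String) : Int :=
  let xs := x.toList
  let ys := y.toList
  -- row 0: dp[0][c] = max(0,c) = c
  let row0 : List Int := (List.range (ys.length + 1)).map (fun (c : Nat) => (c : Int))
  (pvRowsA ys xs row0 1).getLastD 0   -- dp[M][N]

-- ===== PORT B =====
-- Source B's inner loop body: row.append(d + 1 if xc == yc else max(u, row[-1]))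
def pvInnerB (xc : Char) (row : List Int) (p : Char × Int × Int) : List Int :=
  row ++ [if xc = p.1 then p.2.1 + 1 else max p.2.2 (row.getLastD 0)]

-- Source B's inner loop: fold over zip(ys, prev, prev[1:]) starting from [0]
def pvNextRowB (ys : List Char) (prev : List Int) (xc : Char) : List Int :=
  (ys.zip (prev.zip prev.tail)).foldl (pvInnerB xc) [0]

def insert_delete_lcs_alt (x : String) (y : String) : Int :=
  let ys := y.toList
  let prev0 : List Int := List.replicate (ys.length + 1) 0
  let final := x.toList.foldl (pvNextRowB ys) prev0
  (x.toList.length : Int) + (ys.length : Int) - 2 * final.getLastD 0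

-- ===== PRECONDITION & SPEC =====
def Spec_insert_delete_lcs (x : String) (y : String) (out : Int) : Prop := out = insert_delete_lcs_alt x y
instance (x : String) (y : String) (out : Int) : Decidable (Spec_insert_delete_lcs x y out) := by unfold Spec_insert_delete_lcs; infer_instance

-- ===== CLAIM (what is proved, stated in full; the proofs are below) =====
def Claim_equal_insert_delete_lcs : Prop := ∀ (x : String) (y : String), Dom_insert_delete_lcs x y → Spec_insert_delete_lcs x y (insert_delete_lcs x y)

-- ===== LEMMAS AND PROOFS =====

-- proof-side recursive characterisation of B's inner fold (the lcs-row scan)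
def pvStepB (xc : Char) : List Char → List Int → Int → List Int
  | yc :: ys', d :: u :: rest, left =>
      let v := if xc = yc then d + 1 else max u left
      v :: pvStepB xc ys' (u :: rest) v
  | _, _, _ => []

-- proof-side recursive characterisation of B's outer fold
def pvRowsB (ys : List Char) : List Char → List Int → List Int
  | [], prev => prev
  | xc :: xs', prev => pvRowsB ys xs' (0 :: pvStepB xc ys prev 0)

-- scan form of pvStepB over the zipped triples
def pvScan (xc : Char) : List (Char × Int × Int) → Int → List Int
  | [], _ => []
  | (yc, d, u) :: t, left =>
      let v := if xc = yc then d + 1 else max u left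
      v :: pvScan xc t v

theorem foldl_innerB (xc : Char) :
    ∀ (zs : List (Char × Int × Int)) (row : List Int) (left : Int),
      row.getLastD 0 = left → row ≠ [] →
      zs.foldl (pvInnerB xc) row = row ++ pvScan xc zs left := by
  intro zs
  induction zs with
  | nil => intro row left _ _; simp [pvScan]
  | cons p t ih =>
      intro row left hlast hne
      obtain ⟨yc, d, u⟩ := p
      simp only [List.foldl_cons, pvScan]
      have hv : pvInnerB xc row (yc, d, u)
          = row ++ [if xc = yc then d + 1 else max u left] := by
        simp only [pvInnerB]
        rw [hlast]
      rw [hv, ih (row ++ [if xc = yc then d + 1 else max u left])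
            (if xc = yc then d + 1 else max u left) (by simp) (by simp)]
      simp

theorem pvScan_eq_stepB (xc : Char) :
    ∀ (ys : List Char) (pb : List Int) (left : Int),
      pvScan xc (ys.zip (pb.zip pb.tail)) left = pvStepB xc ys pb left := by
  intro ys
  induction ys with
  | nil => intro pb left; cases pb <;> rfl
  | cons yc ys' ih =>
      intro pb left
      match pb with
      | [] => rfl
      | [d] => rfl
      | d :: u :: rest =>
          simp only [List.tail_cons, List.zip_cons_cons, pvScan, pvStepB]
          rw [← ih (u :: rest)]
          rfl

theorem pvNextRowB_eq (ys : List Char) (prev : List Int) (xc : Char) :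
    pvNextRowB ys prev xc = 0 :: pvStepB xc ys prev 0 := by
  unfold pvNextRowB
  rw [foldl_innerB xc _ [0] 0 rfl (by simp), pvScan_eq_stepB]
  rfl

theorem foldl_rowsB (ys : List Char) :
    ∀ (xs : List Char) (prev : List Int),
      xs.foldl (pvNextRowB ys) prev = pvRowsB ys xs prev := by
  intro xs
  induction xs with
  | nil => intro prev; rfl
  | cons xc xs' ih =>
      intro prev
      simp only [List.foldl_cons, pvRowsB, pvNextRowB_eq]
      exact ih _

-- the coupling map: entry of A's table at column c in row r, from B's lcs entry v
def pvTf (r c : Int) : List Int → List Int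
  | [] => []
  | v :: t => (r + c - 2 * v) :: pvTf r (c + 1) t

theorem pvTf_cons (r c v : Int) (t : List Int) :
    pvTf r c (v :: t) = (r + c - 2 * v) :: pvTf r (c + 1) t := rfl

theorem pvStepA_tf (xc : Char) :
    ∀ (ys : List Char) (pb : List Int) (leftB r c : Int),
      pvStepA xc ys (pvTf (r - 1) c pb) (r + c - 2 * leftB)
        = pvTf r (c + 1) (pvStepB xc ys pb leftB) := by
  intro ys
  induction ys with
  | nil =>
      intro pb leftB r c
      cases pb <;> simp [pvStepA, pvStepB, pvTf]
  | cons yc ys' ih =>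
      intro pb leftB r c
      match pb with
      | [] => rfl
      | [d] => rfl
      | d :: u :: rest =>
        simp only [pvTf_cons, pvStepA, pvStepB]
        by_cases h : xc = yc
        · simp only [if_pos h]
          have e2 := ih (u :: rest) (d + 1) r (c + 1)
          rw [pvTf_cons] at e2
          rw [show r - 1 + c - 2 * d = r + (c + 1) - 2 * (d + 1) from by ring, e2]
        · simp only [if_neg h]
          have e2 := ih (u :: rest) (max u leftB) r (c + 1)
          rw [pvTf_cons] at e2
          have e1 : min (r - 1 + (c + 1) - 2 * u) (r + c - 2 * leftB) + 1
              = r + (c + 1) - 2 * max u leftB := by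
            rcases le_total u leftB with hle | hle
            · rw [max_eq_right hle, min_eq_right (by omega)]; ring
            · rw [max_eq_left hle, min_eq_left (by omega)]; ring
          rw [e1, e2]

theorem pvRowsA_tf (ys : List Char) :
    ∀ (xs : List Char) (pb : List Int) (r : Int),
      pvRowsA ys xs (pvTf (r - 1) 0 pb) r = pvTf (r - 1 + xs.length) 0 (pvRowsB ys xs pb) := by
  intro xs
  induction xs with
  | nil => intro pb r; simp [pvRowsA, pvRowsB]
  | cons xc xs' ih =>
      intro pb r
      simp only [pvRowsA, pvRowsB]
      have hstep : pvStepA xc ys (pvTf (r - 1) 0 pb) r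
          = pvTf (r + 1 - 1) (0 + 1) (pvStepB xc ys pb 0) := by
        have h0 := pvStepA_tf xc ys pb 0 r 0
        rw [show r + 0 - 2 * 0 = r from by ring] at h0
        rw [show r + 1 - 1 = r from by ring]
        exact h0
      have hrow : (r :: pvStepA xc ys (pvTf (r - 1) 0 pb) r)
          = pvTf (r + 1 - 1) 0 (0 :: pvStepB xc ys pb 0) := by
        rw [pvTf_cons, hstep]
        congr 1
        ring
      rw [hrow, ih]
      congr 1
      simp only [List.length_cons]
      push_cast
      ring

theorem pvTf_getLastD :
    ∀ (l : List Int) (r c : Int), l ≠ [] →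
      (pvTf r c l).getLastD 0 = r + c + ((l.length : Int) - 1) - 2 * l.getLastD 0 := by
  intro l
  induction l with
  | nil => intro r c h; exact absurd rfl h
  | cons v t ih =>
      intro r c _
      cases t with
      | nil => simp [pvTf]
      | cons w t' =>
          have h := ih r (c + 1) (by simp)
          simp only [pvTf_cons, List.getLastD_cons, List.length_cons] at h ⊢
          rw [h]
          push_cast
          ring

theorem pvStepB_length (xc : Char) :
    ∀ (ys : List Char) (pb : List Int) (left : Int), pb.length = ys.length + 1 →
      (pvStepB xc ys pb left).length = ys.length := by
  intro ys
  induction ys with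
  | nil => intro pb left _; cases pb <;> rfl
  | cons yc ys' ih =>
      intro pb left h
      match pb, h with
      | d :: u :: rest, h =>
        simp only [pvStepB, List.length_cons]
        rw [ih (u :: rest) _ (by simpa using h)]

theorem pvRowsB_length (ys : List Char) :
    ∀ (xs : List Char) (pb : List Int), pb.length = ys.length + 1 →
      (pvRowsB ys xs pb).length = ys.length + 1 := by
  intro xs
  induction xs with
  | nil => intro pb h; simpa [pvRowsB] using h
  | cons xc xs' ih =>
      intro pb h
      simp only [pvRowsB]
      exact ih _ (by simp [pvStepB_length xc ys pb 0 h])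

theorem pvTf_replicate :
    ∀ (n : Nat) (c : Int), pvTf 0 c (List.replicate n 0) = (List.range n).map (fun (i : Nat) => c + (i : Int)) := by
  intro n
  induction n with
  | zero => intro c; rfl
  | succ m ih =>
      intro c
      rw [List.replicate_succ, pvTf_cons, List.range_succ_eq_map, ih (c + 1)]
      simp only [List.map_cons, List.map_map]
      refine congrArg₂ List.cons (by push_cast; ring) ?_
      apply List.map_congr_left
      intro i _
      simp only [Function.comp_apply]
      push_cast
      ring

theorem pvLists_eq (xs ys : List Char) :
    (pvRowsA ys xs ((List.range (ys.length + 1)).map (fun (c : Nat) => (c : Int))) 1).getLastD 0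
      = (xs.length : Int) + (ys.length : Int)
        - 2 * (pvRowsB ys xs (List.replicate (ys.length + 1) 0)).getLastD 0 := by
  have hrow0 : ((List.range (ys.length + 1)).map (fun (c : Nat) => (c : Int)))
      = pvTf (1 - 1) 0 (List.replicate (ys.length + 1) 0) := by
    rw [show (1:Int) - 1 = 0 from rfl, pvTf_replicate]
    apply List.map_congr_left
    intro i _
    ring
  rw [hrow0, pvRowsA_tf]
  have hlen : (pvRowsB ys xs (List.replicate (ys.length + 1) 0)).length = ys.length + 1 :=
    pvRowsB_length ys xs _ (by simp)
  have hne : pvRowsB ys xs (List.replicate (ys.length + 1) 0) ≠ [] := by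
    intro h; rw [h] at hlen; simp at hlen
  rw [pvTf_getLastD _ _ _ hne, hlen]
  push_cast
  ring

-- ===== VERDICT (by name: the statement is the Claim_ definition above) =====
theorem insert_delete_lcs_spec : Claim_equal_insert_delete_lcs := by
  intro x y _
  unfold Spec_insert_delete_lcs insert_delete_lcs insert_delete_lcs_alt
  simp only [foldl_rowsB]
  exact pvLists_eq x.toList y.toList
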